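-- pv_equiv track=rewrite | github.com/sanylos/MENDELU-python | prevod_do_desitkove_soustavy.py | preved_na_desitkove
-- ===== SOURCE A (Python) =====
-- def preved_na_desitkove(vstup, soustava):
--     s=0
--     for x in vstup:
--         if x >= "0" and x <= "9":
--             s = s * soustava + ord(x) - ord("0")
--         else:
--             s = s * soustava + ord(x) - ord("a") + 10
--     return s
-- ===== SOURCE B (Python) =====
-- def preved_na_desitkove(vstup, soustava):
--     cifry = [ord(x) - ord("0") if "0" <= x <= "9" else ord(x) - ord("a") + 10
--              for x in vstup]
--     s = 0
--     power = 1
--     for d in reversed(cifry):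
--         s += d * power
--         power *= soustava
--     return s
-- ===== Notes on version B (the rewrite author's own statement) =====
-- stated objective: alternative
-- what changed: Splits the work into two stages: a decode pass producing the list of digit values, then a right-to-left weighted sum maintaining an explicit power-of-base accumulator, instead of A's single Horner fused multiply-add loop.
import Mathlib
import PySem

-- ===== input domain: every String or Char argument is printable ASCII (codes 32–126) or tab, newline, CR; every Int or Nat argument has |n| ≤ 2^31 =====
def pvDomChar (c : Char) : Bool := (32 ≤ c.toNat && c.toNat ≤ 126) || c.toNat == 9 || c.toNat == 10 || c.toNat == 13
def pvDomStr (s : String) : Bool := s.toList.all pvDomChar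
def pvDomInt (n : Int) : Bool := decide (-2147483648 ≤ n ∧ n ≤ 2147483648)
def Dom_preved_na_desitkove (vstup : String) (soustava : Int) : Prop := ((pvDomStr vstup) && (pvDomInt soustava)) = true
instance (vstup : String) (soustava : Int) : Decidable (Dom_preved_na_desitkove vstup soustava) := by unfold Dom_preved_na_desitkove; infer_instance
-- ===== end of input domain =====

-- B stages the work: decode all digits first, then sum them right-to-left with an explicit power accumulator, instead of A's single Horner loop (objective: alternative).

-- ===== PORT A =====
-- Horner: s = s*base + digit, left to right, in one loop.
def preved_na_desitkove (vstup : String) (soustava : Int) : Int :=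
  vstup.toList.foldl
    (fun s x =>
      if x ≥ '0' ∧ x ≤ '9' then s * soustava + (x.toNat : Int) - ('0'.toNat : Int)
      else s * soustava + (x.toNat : Int) - ('a'.toNat : Int) + 10)
    0

-- ===== PORT B =====
-- stage 1 of Source B: the decode comprehension, digit value of one character
def pvHodnota (x : Char) : Int :=
  if '0' ≤ x ∧ x ≤ '9' then (x.toNat : Int) - ('0'.toNat : Int)
  else (x.toNat : Int) - ('a'.toNat : Int) + 10

-- stage 2 of Source B: the reversed loop, as tail recursion with accumulators s and power
def pvSuma (soustava : Int) : List Int → Int → Int → Int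
  | [], s, _ => s
  | d :: rest, s, power => pvSuma soustava rest (s + d * power) (power * soustava)

def preved_na_desitkove_alt (vstup : String) (soustava : Int) : Int :=
  pvSuma soustava ((vstup.toList.map pvHodnota).reverse) 0 1

-- ===== PRECONDITION & SPEC =====
def Spec_preved_na_desitkove (vstup : String) (soustava : Int) (out : Int) : Prop := out = preved_na_desitkove_alt vstup soustava
instance (vstup : String) (soustava : Int) (out : Int) : Decidable (Spec_preved_na_desitkove vstup soustava out) := by unfold Spec_preved_na_desitkove; infer_instance

-- ===== CLAIM (what is proved, stated in full; the proofs are below) =====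
def Claim_equal_preved_na_desitkove : Prop := ∀ (vstup : String) (soustava : Int), Dom_preved_na_desitkove vstup soustava → Spec_preved_na_desitkove vstup soustava (preved_na_desitkove vstup soustava)

-- ===== LEMMAS AND PROOFS =====

def pvStepA (b : Int) (s : Int) (x : Char) : Int := s * b + pvHodnota x

-- H: evaluate a digit list with increasing powers of b from the head
def pvH (b : Int) : List Int → Int
  | [] => 0
  | d :: r => d + b * pvH b r

theorem pvA_eq (vstup : String) (b : Int) :
    preved_na_desitkove vstup b = vstup.toList.foldl (pvStepA b) 0 := by
  unfold preved_na_desitkove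
  congr 1
  funext s x
  simp [pvStepA, pvHodnota]
  split <;> ring

theorem pvH_snoc (b : Int) (L : List Int) (d : Int) :
    pvH b (L ++ [d]) = d * b ^ L.length + pvH b L := by
  induction L with
  | nil => simp [pvH]
  | cons e r ih => simp [pvH, ih]; ring

-- Horner with arbitrary seed equals seed·b^n plus pvH of the reversed digit list
theorem pvHorner_H (b : Int) (l : List Char) (s : Int) :
    l.foldl (pvStepA b) s = s * b ^ l.length + pvH b ((l.map pvHodnota).reverse) := by
  induction l generalizing s with
  | nil => simp [pvH]
  | cons x t ih =>
    simp only [List.foldl_cons, List.length_cons, List.map_cons, List.reverse_cons]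
    rw [ih (pvStepA b s x), pvH_snoc]
    simp [pvStepA]
    ring

theorem pvSuma_eq (b : Int) (L : List Int) (s p : Int) :
    pvSuma b L s p = s + p * pvH b L := by
  induction L generalizing s p with
  | nil => simp [pvSuma, pvH]
  | cons d r ih =>
    simp only [pvSuma, pvH]
    rw [ih]
    ring

-- ===== VERDICT (by name: the statement is the Claim_ definition above) =====
theorem preved_na_desitkove_spec : Claim_equal_preved_na_desitkove := by
  intro vstup soustava _
  unfold Spec_preved_na_desitkove preved_na_desitkove_alt
  rw [pvA_eq, pvHorner_H, pvSuma_eq]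
  ring
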